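-- pv_equiv track=rewrite | github.com/cwza/text_to_img | text_to_img/data_coco.py | displayable_caption
-- ===== SOURCE A (Python) =====
-- def displayable_caption(caption):
--     new_cap = []
--     for i, w in enumerate(caption.split()):
--         i+=1
--         if i>11: break
--         new_cap.append(w)
--         if i%6==0: new_cap.append('\n')
--     return ' '.join(new_cap)
-- ===== SOURCE B (Python) =====
-- def displayable_caption(caption):
--     words = caption.split()[:11]
--     parts = words[:6]
--     if len(words) >= 6:
--         parts.append('\n')
--     parts.extend(words[6:])
--     return ' '.join(parts)
-- ===== Notes on version B (the rewrite author's own statement) =====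
-- stated objective: simpler
-- what changed: Replaces the enumerate counter with break and the i%6 modulo test by slicing: take the first 11 words, insert a single newline element at the only reachable boundary (after word 6), then join.
import Mathlib
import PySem

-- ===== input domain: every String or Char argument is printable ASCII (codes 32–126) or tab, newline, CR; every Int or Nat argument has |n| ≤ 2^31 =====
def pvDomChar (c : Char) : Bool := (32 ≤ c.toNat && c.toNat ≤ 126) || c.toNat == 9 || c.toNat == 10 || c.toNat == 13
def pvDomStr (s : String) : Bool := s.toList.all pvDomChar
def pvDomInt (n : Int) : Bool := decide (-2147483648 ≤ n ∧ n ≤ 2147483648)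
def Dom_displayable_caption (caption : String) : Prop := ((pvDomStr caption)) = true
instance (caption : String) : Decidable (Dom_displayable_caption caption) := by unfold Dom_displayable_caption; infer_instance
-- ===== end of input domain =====

-- B replaces A's enumerate/modulo counting loop by slicing at the single reachable
-- newline boundary (6) of the first 11 words; objective: simpler, not faster.

-- ===== PORT A =====
-- the loop: i is the (already incremented) enumerate counter, acc is new_cap
def pvALoop : List String → Nat → List String → List String
  | [], _, acc => acc
  | w :: ws, i, acc =>
    let i1 := i + 1
    if i1 > 11 then acc
    else
      let acc1 := acc ++ [w]
      let acc2 := if i1 % 6 == 0 then acc1 ++ ["\n"] else acc1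
      pvALoop ws i1 acc2

def displayable_caption (caption : String) : String :=
  PySem.Str.join " " (pvALoop (PySem.Str.split₀ caption) 0 [])

-- ===== PORT B =====
def displayable_caption_alt (caption : String) : String :=
  let words := PySem.List.slice (PySem.Str.split₀ caption) none (some 11)
  let parts := PySem.List.slice words none (some 6)
  let parts := if 6 ≤ words.length then parts ++ ["\n"] else parts
  let parts := parts ++ PySem.List.slice words (some 6) none
  PySem.Str.join " " parts

-- ===== PRECONDITION & SPEC =====
def Spec_displayable_caption (caption : String) (out : String) : Prop := out = displayable_caption_alt caption
instance (caption : String) (out : String) : Decidable (Spec_displayable_caption caption out) := by unfold Spec_displayable_caption; infer_instance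

-- ===== CLAIM (what is proved, stated in full; the proofs are below) =====
def Claim_equal_displayable_caption : Prop := ∀ (caption : String), Dom_displayable_caption caption → Spec_displayable_caption caption (displayable_caption caption)

-- ===== LEMMAS AND PROOFS =====

-- both programs, as functions of the word list: exhaustive case split to depth 12
-- (A's loop breaks after the 11th word, so the tail beyond 12 words is irrelevant)
lemma pv_key (ws : List String) :
    PySem.Str.join " " (pvALoop ws 0 []) =
      (let words := PySem.List.slice ws none (some 11)
       let parts := PySem.List.slice words none (some 6)
       let parts := if 6 ≤ words.length then parts ++ ["\n"] else parts
       let parts := parts ++ PySem.List.slice words (some 6) none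
       PySem.Str.join " " parts) := by
  rcases ws with _|⟨a1,_|⟨a2,_|⟨a3,_|⟨a4,_|⟨a5,_|⟨a6,_|⟨a7,_|⟨a8,_|⟨a9,_|⟨a10,_|⟨a11,_|⟨a12,t⟩⟩⟩⟩⟩⟩⟩⟩⟩⟩⟩⟩ <;>
    rfl

-- ===== VERDICT (by name: the statement is the Claim_ definition above) =====
theorem displayable_caption_spec : Claim_equal_displayable_caption := by
  intro caption _
  show _ = _
  unfold displayable_caption displayable_caption_alt
  exact pv_key (PySem.Str.split₀ caption)
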